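-- pv_equiv track=rewrite | github.com/anon347/tot-q | besser/utilities/web_modeling_editor/backend/services/sugiyama_layout.py | _spread_dense_layers_smart
-- ===== SOURCE A (Python) =====
-- from typing import Dict, List, Tuple, Set, Optional
--
-- def _spread_dense_layers_smart(node_layers: Dict[str, int], inheritance_nodes: Set[str],
--                                max_per_layer_inheritance: int = 4,
--                                max_per_layer_other: int = 2) -> Dict[str, int]:
--     """
--     Spread out layers intelligently, treating inheritance-related nodes differently.
--     Inheritance-related nodes can be packed more densely than unrelated nodes.
--     Association-only nodes are placed to avoid interrupting inheritance hierarchies.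
--
--     CRITICAL CONSTRAINT: Siblings (children with same parent) MUST stay on the same layer.
--     """
--     # Build sibling groups from inheritance edges in the graph
--     # This is needed to ensure siblings are never separated
--     from collections import defaultdict
--     parent_children_map = defaultdict(list)
--
--     # We need to rebuild this from the graph, but we don't have direct access here
--     # Instead, we'll identify potential siblings by checking their layer assignment
--     # Siblings will have been assigned to the same layer by _layer_by_inheritance
--
--     # Count nodes per layer, separating inheritance from non-inheritance nodes
--     layer_info = defaultdict(lambda: {'inheritance': [], 'other': []})
--     for node, layer in node_layers.items():
--         if node in inheritance_nodes:
--             layer_info[layer]['inheritance'].append(node)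
--         else:
--             layer_info[layer]['other'].append(node)
--
--     # Redistribute nodes from dense layers
--     new_node_layers = {}
--     layer_offset = 0
--
--     for layer in sorted(layer_info.keys()):
--         inheritance_in_layer = layer_info[layer]['inheritance']
--         other_in_layer = layer_info[layer]['other']
--
--         # Calculate how many sublayers we need
--         num_sublayers_inheritance = (len(inheritance_in_layer) + max_per_layer_inheritance - 1) // max_per_layer_inheritance if inheritance_in_layer else 0
--         num_sublayers_other = (len(other_in_layer) + max_per_layer_other - 1) // max_per_layer_other if other_in_layer else 0
--         num_sublayers = max(num_sublayers_inheritance, num_sublayers_other, 1)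
--
--         if num_sublayers == 1:
--             # All nodes fit in one layer - keep them together
--             for node in inheritance_in_layer + other_in_layer:
--                 new_node_layers[node] = layer + layer_offset
--         else:
--             # CRITICAL: When splitting layers, we MUST keep all inheritance nodes
--             # from the SAME original layer TOGETHER, because they are likely siblings.
--             # DO NOT split inheritance nodes across sublayers within the same original layer.
--
--             # Strategy: Place ALL inheritance nodes in the FIRST sublayer (sublayer 0)
--             # This ensures siblings stay together
--             for node in inheritance_in_layer:
--                 new_node_layers[node] = layer + layer_offset
--
--             # For other nodes, place them in subsequent sublayers to avoid interruption
--             if inheritance_in_layer: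
--                 # Place other nodes in last sublayer to avoid interrupting
--                 for node in other_in_layer:
--                     new_node_layers[node] = layer + layer_offset + num_sublayers - 1
--             else:
--                 # No inheritance nodes, spread normally
--                 for i, node in enumerate(other_in_layer):
--                     sublayer = min(i // max_per_layer_other, num_sublayers - 1)
--                     new_node_layers[node] = layer + layer_offset + sublayer
--
--             # Add offset for next layers
--             layer_offset += num_sublayers - 1
--
--     return new_node_layers
-- ===== SOURCE B (Python) =====
-- def _spread_dense_layers_smart(node_layers, inheritance_nodes,
--                                max_per_layer_inheritance=4,
--                                max_per_layer_other=2):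
--     items = list(node_layers.items())
--     layers = sorted(dict.fromkeys(l for _, l in items))
--
--     def ceil_div(n, m):
--         return (n + m - 1) // m
--
--     # Phase 1: build a placement plan: per sorted layer, its node groups,
--     # a precomputed prefix-sum offset and its sublayer count.
--     plan = []
--     offset = 0
--     for layer in layers:
--         inh = [n for n, l in items if l == layer and n in inheritance_nodes]
--         oth = [n for n, l in items if l == layer and n not in inheritance_nodes]
--         ns = max(ceil_div(len(inh), max_per_layer_inheritance) if inh else 0,
--                  ceil_div(len(oth), max_per_layer_other) if oth else 0,
--                  1)
--         plan.append((layer, inh, oth, offset, ns))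
--         offset += ns - 1
--
--     # Phase 2: pure assignment pass driven only by the plan.
--     new_layers = {}
--     for layer, inh, oth, off, ns in plan:
--         if ns == 1:
--             for n in inh + oth:
--                 new_layers[n] = layer + off
--         elif inh:
--             for n in inh:
--                 new_layers[n] = layer + off
--             for n in oth:
--                 new_layers[n] = layer + off + ns - 1
--         else:
--             for i, n in enumerate(oth):
--                 new_layers[n] = layer + off + min(i // max_per_layer_other, ns - 1)
--     return new_layers
-- ===== Notes on version B (the rewrite author's own statement) =====
-- stated objective: alternative
-- what changed: A's single loop that groups via a defaultdict and threads a layer_offset accumulator while writing the result dict is replaced by a plan-then-assign decomposition: per sorted layer, filter-based inheritance/other groups plus a precomputed prefix-sum offset and sublayer count are collected into a plan table, and a separate pure pass assigns layers from that table.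
import Mathlib
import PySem

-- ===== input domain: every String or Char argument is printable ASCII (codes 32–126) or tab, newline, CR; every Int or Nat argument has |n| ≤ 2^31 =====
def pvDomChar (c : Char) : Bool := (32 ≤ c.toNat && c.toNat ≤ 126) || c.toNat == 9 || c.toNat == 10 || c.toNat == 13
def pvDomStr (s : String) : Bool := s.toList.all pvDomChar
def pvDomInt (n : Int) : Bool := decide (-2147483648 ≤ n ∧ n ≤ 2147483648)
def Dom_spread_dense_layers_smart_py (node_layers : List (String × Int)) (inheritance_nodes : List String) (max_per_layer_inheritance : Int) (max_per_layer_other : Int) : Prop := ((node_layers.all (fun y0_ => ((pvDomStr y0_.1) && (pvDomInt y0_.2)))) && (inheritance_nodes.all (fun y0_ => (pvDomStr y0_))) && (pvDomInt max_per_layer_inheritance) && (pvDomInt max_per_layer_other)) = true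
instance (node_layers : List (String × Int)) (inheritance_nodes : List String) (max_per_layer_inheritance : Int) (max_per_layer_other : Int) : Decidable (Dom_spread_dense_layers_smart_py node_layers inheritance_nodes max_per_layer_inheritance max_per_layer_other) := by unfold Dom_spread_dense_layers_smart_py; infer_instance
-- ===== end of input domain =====

-- B replaces A's single loop (defaultdict grouping + threaded layer_offset accumulator +
-- in-loop dict writes) by a plan-then-assign decomposition: filter-based per-layer groups
-- with a precomputed prefix offset table, then a pure assignment pass (objective: alternative).



-- ===== PORT A =====
-- body of A's grouping loop: layer_info[layer]['inheritance'/'other'].append(node)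
def pvGroupStepA (S : List String) (li : PySem.Dict Int (List String × List String)) (nl : String × Int) : PySem.Dict Int (List String × List String) :=
  li.modify nl.2 ([], []) (fun p => if nl.1 ∈ S then (p.1 ++ [nl.1], p.2) else (p.1, p.2 ++ [nl.1]))

-- body of A's main loop over sorted layers; state = (new_node_layers, layer_offset)
def pvStepA (mpi mpo : Int) (li : PySem.Dict Int (List String × List String)) (st : PySem.Dict String Int × Int) (layer : Int) : PySem.Dict String Int × Int :=
  let info := li.getD layer ([], [])
  let inh := info.1
  let oth := info.2
  let nsi := if inh ≠ [] then PySem.Int.floordiv ((inh.length : Int) + mpi - 1) mpi else 0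
  let nso := if oth ≠ [] then PySem.Int.floordiv ((oth.length : Int) + mpo - 1) mpo else 0
  let ns := max (max nsi nso) 1
  if ns = 1 then
    ((inh ++ oth).foldl (fun d n => d.insert n (layer + st.2)) st.1, st.2)
  else
    let d1 := inh.foldl (fun d n => d.insert n (layer + st.2)) st.1
    let d2 :=
      if inh ≠ [] then
        oth.foldl (fun d n => d.insert n (layer + st.2 + ns - 1)) d1
      else
        (PySem.List.enumerate oth).foldl
          (fun d p => d.insert p.2 (layer + st.2 + min (PySem.Int.floordiv p.1 mpo) (ns - 1))) d1
    (d2, st.2 + (ns - 1))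

def spread_dense_layers_smart_py (node_layers : List (String × Int)) (inheritance_nodes : List String) (max_per_layer_inheritance : Int) (max_per_layer_other : Int) : List (String × Int) :=
  let items := (PySem.Dict.ofList node_layers).items
  let layer_info := items.foldl (pvGroupStepA inheritance_nodes) PySem.Dict.empty
  ((PySem.List.sorted layer_info.keys id).foldl
      (pvStepA max_per_layer_inheritance max_per_layer_other layer_info)
      (PySem.Dict.empty, 0)).1.items

-- ===== PORT B =====
-- ceil_div(n, m) = (n + m - 1) // m
def pvCeilDiv (n m : Int) : Int := PySem.Int.floordiv (n + m - 1) m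

-- the two comprehensions: [n for n, l in items if l == layer and n (not) in inheritance_nodes]
def pvInh (items : List (String × Int)) (S : List String) (layer : Int) : List String :=
  (items.filter (fun p => p.2 == layer && decide (p.1 ∈ S))).map (·.1)
def pvOth (items : List (String × Int)) (S : List String) (layer : Int) : List String :=
  (items.filter (fun p => p.2 == layer && !decide (p.1 ∈ S))).map (·.1)

-- ns = max(ceil_div(len(inh), mpi) if inh else 0, ceil_div(len(oth), mpo) if oth else 0, 1)
def pvNsOf (items : List (String × Int)) (S : List String) (mpi mpo : Int) (layer : Int) : Int :=
  max (max (if pvInh items S layer ≠ [] then pvCeilDiv ((pvInh items S layer).length : Int) mpi else 0)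
           (if pvOth items S layer ≠ [] then pvCeilDiv ((pvOth items S layer).length : Int) mpo else 0)) 1

-- phase-1 loop body: append a plan entry, advance the prefix offset
def pvPlanStep (items : List (String × Int)) (S : List String) (mpi mpo : Int) (st : List (Int × List String × List String × Int × Int) × Int) (layer : Int) : List (Int × List String × List String × Int × Int) × Int :=
  (st.1 ++ [(layer, pvInh items S layer, pvOth items S layer, st.2, pvNsOf items S mpi mpo layer)],
   st.2 + (pvNsOf items S mpi mpo layer - 1))

-- phase-2 loop body: pure assignment from one plan entry
def pvAssign (mpo : Int) (d : PySem.Dict String Int) (pl : Int × List String × List String × Int × Int) : PySem.Dict String Int :=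
  let (layer, inh, oth, off, ns) := pl
  if ns = 1 then
    (inh ++ oth).foldl (fun d n => d.insert n (layer + off)) d
  else if inh ≠ [] then
    oth.foldl (fun d n => d.insert n (layer + off + ns - 1))
      (inh.foldl (fun d n => d.insert n (layer + off)) d)
  else
    (PySem.List.enumerate oth).foldl
      (fun d p => d.insert p.2 (layer + off + min (PySem.Int.floordiv p.1 mpo) (ns - 1))) d

def spread_dense_layers_smart_py_alt (node_layers : List (String × Int)) (inheritance_nodes : List String) (max_per_layer_inheritance : Int) (max_per_layer_other : Int) : List (String × Int) :=
  let items := (PySem.Dict.ofList node_layers).items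
  let layers := PySem.List.sorted (PySem.List.dedup (items.map (·.2))) id
  let plan := (layers.foldl (pvPlanStep items inheritance_nodes max_per_layer_inheritance max_per_layer_other) ([], 0)).1
  (plan.foldl (pvAssign max_per_layer_other) PySem.Dict.empty).items

-- ===== PRECONDITION & SPEC =====
-- Pre_ excludes exactly the inputs where Python A raises ZeroDivisionError: a zero
-- max_per_layer_* bound while some node of the corresponding kind is present.
def Pre_spread_dense_layers_smart_py (node_layers : List (String × Int)) (inheritance_nodes : List String) (max_per_layer_inheritance : Int) (max_per_layer_other : Int) : Prop :=
  (max_per_layer_inheritance = 0 → ∀ p ∈ node_layers, p.1 ∉ inheritance_nodes) ∧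
  (max_per_layer_other = 0 → ∀ p ∈ node_layers, p.1 ∈ inheritance_nodes)
instance (node_layers : List (String × Int)) (inheritance_nodes : List String) (max_per_layer_inheritance : Int) (max_per_layer_other : Int) : Decidable (Pre_spread_dense_layers_smart_py node_layers inheritance_nodes max_per_layer_inheritance max_per_layer_other) := by unfold Pre_spread_dense_layers_smart_py; infer_instance

def pvWitness_spread_dense_layers_smart_py : (List (String × Int)) × List String × Int × Int :=
  ([("a", 0), ("b", 0), ("c", 1)], ["a", "b"], 4, 2)

def Spec_spread_dense_layers_smart_py (node_layers : List (String × Int)) (inheritance_nodes : List String) (max_per_layer_inheritance : Int) (max_per_layer_other : Int) (out : List (String × Int)) : Prop := out = spread_dense_layers_smart_py_alt node_layers inheritance_nodes max_per_layer_inheritance max_per_layer_other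
instance (node_layers : List (String × Int)) (inheritance_nodes : List String) (max_per_layer_inheritance : Int) (max_per_layer_other : Int) (out : List (String × Int)) : Decidable (Spec_spread_dense_layers_smart_py node_layers inheritance_nodes max_per_layer_inheritance max_per_layer_other out) := by unfold Spec_spread_dense_layers_smart_py; infer_instance

-- ===== CLAIM (what is proved, stated in full; the proofs are below) =====
def Claim_equal_spread_dense_layers_smart_py : Prop := ∀ (node_layers : List (String × Int)) (inheritance_nodes : List String) (max_per_layer_inheritance : Int) (max_per_layer_other : Int), Dom_spread_dense_layers_smart_py node_layers inheritance_nodes max_per_layer_inheritance max_per_layer_other → Pre_spread_dense_layers_smart_py node_layers inheritance_nodes max_per_layer_inheritance max_per_layer_other → Spec_spread_dense_layers_smart_py node_layers inheritance_nodes max_per_layer_inheritance max_per_layer_other (spread_dense_layers_smart_py node_layers inheritance_nodes max_per_layer_inheritance max_per_layer_other)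

-- ===== LEMMAS AND PROOFS =====

-- A's grouping dict, looked up at any layer, is exactly B's pair of filters.
theorem pv_group_getD (S : List String) (l : List (String × Int)) (d : PySem.Dict Int (List String × List String)) (c : Int) :
    (l.foldl (pvGroupStepA S) d).getD c ([], [])
    = ((d.getD c ([], [])).1 ++ (l.filter (fun p => p.2 == c && decide (p.1 ∈ S))).map (·.1),
       (d.getD c ([], [])).2 ++ (l.filter (fun p => p.2 == c && !decide (p.1 ∈ S))).map (·.1)) := by
  induction l generalizing d with
  | nil => simp
  | cons hd tl ih =>
    simp only [List.foldl_cons, ih, pvGroupStepA, PySem.Dict.getD_modify, List.filter_cons]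
    by_cases hc : hd.2 = c
    · by_cases hS : hd.1 ∈ S <;> simp [hc, hS]
    · by_cases hS : hd.1 ∈ S <;> simp [hc, hS, Ne.symm hc]

theorem pv_group_getD' (S : List String) (l : List (String × Int)) (c : Int) :
    (l.foldl (pvGroupStepA S) PySem.Dict.empty).getD c ([], []) = (pvInh l S c, pvOth l S c) := by
  rw [pv_group_getD]; simp [pvInh, pvOth]

-- the keys of A's grouping dict are the distinct layer values, so the sorted lists agree
theorem pv_keys (S : List String) (l : List (String × Int)) :
    (l.foldl (pvGroupStepA S) PySem.Dict.empty).keys = PySem.List.dedup (l.map (·.2)) := by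
  have h := PySem.Dict.keys_foldl_modify_key l (fun nl : String × Int => nl.2) (([], []) : List String × List String)
      (fun _ nl p => if nl.1 ∈ S then (p.1 ++ [nl.1], p.2) else (p.1, p.2 ++ [nl.1]))
      (PySem.Dict.empty)
  simpa [pvGroupStepA, PySem.List.dedup, PySem.Set.ofList, PySem.Set.update] using h

-- phase 1 with a non-empty accumulator just prepends it
theorem pv_plan_acc (items : List (String × Int)) (S : List String) (mpi mpo : Int) (ls : List Int) (acc : List (Int × List String × List String × Int × Int)) (off : Int) :
    (ls.foldl (pvPlanStep items S mpi mpo) (acc, off)).1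
      = acc ++ (ls.foldl (pvPlanStep items S mpi mpo) ([], off)).1 := by
  induction ls generalizing acc off with
  | nil => simp
  | cons c ls ih =>
    simp only [List.foldl_cons, pvPlanStep, List.nil_append]
    rw [ih (acc ++ [(c, pvInh items S c, pvOth items S c, off, pvNsOf items S mpi mpo c)]) (off + (pvNsOf items S mpi mpo c - 1)),
        ih ([(c, pvInh items S c, pvOth items S c, off, pvNsOf items S mpi mpo c)]) (off + (pvNsOf items S mpi mpo c - 1)),
        List.append_assoc]

-- one step of A's main loop = one plan entry + one pure assignment
theorem pv_stepA_eq (mpi mpo : Int) (S : List String) (li : PySem.Dict Int (List String × List String)) (items : List (String × Int)) (c : Int)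
    (hgc : li.getD c ([], []) = (pvInh items S c, pvOth items S c)) (d : PySem.Dict String Int) (off : Int) :
    pvStepA mpi mpo li (d, off) c
      = (pvAssign mpo d (c, pvInh items S c, pvOth items S c, off, pvNsOf items S mpi mpo c),
         off + (pvNsOf items S mpi mpo c - 1)) := by
  unfold pvStepA pvAssign pvNsOf pvCeilDiv
  rw [hgc]
  by_cases h1 : max (max (if pvInh items S c ≠ [] then PySem.Int.floordiv ((pvInh items S c).length + mpi - 1) mpi else 0) (if pvOth items S c ≠ [] then PySem.Int.floordiv ((pvOth items S c).length + mpo - 1) mpo else 0)) 1 = 1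
  · simp only [h1]
    simp
  · simp only [if_neg h1]
    by_cases h2 : pvInh items S c ≠ []
    · simp [h2]
    · simp only [h2]
      simp at h2
      simp [h2]

-- the whole main loop of A = B's plan fold followed by B's assignment fold
theorem pv_main (S : List String) (mpi mpo : Int) (li : PySem.Dict Int (List String × List String)) (items : List (String × Int))
    (hg : ∀ c, li.getD c ([], []) = (pvInh items S c, pvOth items S c)) (ls : List Int) (off : Int) (d : PySem.Dict String Int) :
    (ls.foldl (pvStepA mpi mpo li) (d, off)).1
      = ((ls.foldl (pvPlanStep items S mpi mpo) ([], off)).1).foldl (pvAssign mpo) d := by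
  induction ls generalizing off d with
  | nil => simp
  | cons c ls ih =>
    simp only [List.foldl_cons]
    rw [pv_stepA_eq mpi mpo S li items c (hg c) d off, ih]
    rw [show pvPlanStep items S mpi mpo ([], off) c
          = ([(c, pvInh items S c, pvOth items S c, off, pvNsOf items S mpi mpo c)], off + (pvNsOf items S mpi mpo c - 1)) from rfl]
    rw [pv_plan_acc items S mpi mpo ls ([(c, pvInh items S c, pvOth items S c, off, pvNsOf items S mpi mpo c)]) (off + (pvNsOf items S mpi mpo c - 1))]
    simp

-- ===== VERDICT (by name: the statement is the Claim_ definition above) =====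
theorem spread_dense_layers_smart_py_spec : Claim_equal_spread_dense_layers_smart_py := by
  intro node_layers S mpi mpo _ _
  unfold Spec_spread_dense_layers_smart_py spread_dense_layers_smart_py spread_dense_layers_smart_py_alt
  simp only [pv_keys]
  rw [pv_main S mpi mpo _ ((PySem.Dict.ofList node_layers).items)
      (fun c => pv_group_getD' S ((PySem.Dict.ofList node_layers).items) c)]
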